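-- pv_equiv track=rewrite | github.com/Elfsong/MEDIQA-Chat-2023-NUS-IDS | TaskC/NPExtractor.py | getNPs
-- ===== SOURCE A (Python) =====
-- def getNPs(words, postags):
--      kp_tags=[]
--
--      for wx, word in enumerate(words):
--          if (postags[wx]=="NOUN" or postags[wx]=="PROPN" or postags[wx]=="ADJ"):
--              if wx==0 or (postags[wx-1]!="NOUN" \
--                           and postags[wx-1]!="PROPN"
--                           and postags[wx-1]!="ADJ"
--                           and postags[wx-1]!="ADP"
--                           and postags[wx-1]!="CCONJ") :
--                 kp_tags.append('B-KP')
--              else: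
--                 kp_tags.append('I-KP')
--          elif (postags[wx]=="CCONJ" or postags[wx]=="ADP" ) and (wx<len(words)-1) and \
--             (postags[wx+1]=="NOUN" or \
--              postags[wx+1]=="PROPN"):
--             kp_tags.append('I-KP')
--          else:
--             kp_tags.append('O')
--
--      kpzones=[]
--      covered=-1
--      for wx, word in enumerate(words):
--
--          if covered!=-1 and wx<covered:
--              continue
--
--
--
--          if kp_tags[wx].startswith("B"):
--              temp = word
--
--              for wx2 in range(wx+1, len(words)):
--                  if kp_tags[wx2]!="O":
--                      temp+=" "+words[wx2]
--                  else:
--                      break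
--
--              temp = temp.strip()
--              if len(temp.split())==1:
--                 continue
--              if temp not in kpzones:
--                  kpzones.append(temp)
--              covered = wx + len(temp.split())
--             #print ("\n"+temp)
--
--      return kpzones
-- ===== SOURCE B (Python) =====
-- def getNPs(words, postags):
--     n = len(words)
--
--     def non_o(j):
--         return (postags[j] in ("NOUN", "PROPN", "ADJ")
--                 or (postags[j] in ("CCONJ", "ADP") and j + 1 < n
--                     and postags[j + 1] in ("NOUN", "PROPN")))
--
--     def begins(i):
--         return (postags[i] in ("NOUN", "PROPN", "ADJ")
--                 and (i == 0 or postags[i - 1] not in ("NOUN", "PROPN", "ADJ", "ADP", "CCONJ")))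
--
--     # backward DP pass: end[j] = exclusive end of the maximal phrase-word chunk containing j
--     end = [0] * (n + 1)
--     end[n] = n
--     for j in range(n - 1, -1, -1):
--         end[j] = end[j + 1] if non_o(j) else j
--
--     # one candidate phrase per chunk headed by a phrase-starting word, by slicing and joining
--     cands = [(i, " ".join(words[i:end[i]]).strip()) for i in range(n) if begins(i)]
--
--     # fold the candidate list with a coverage frontier, keeping new multi-word phrases
--     res, covered = [], 0
--     for start, phrase in cands:
--         if start < covered:
--             continue
--         toks = len(phrase.split())
--         if toks == 1:
--             continue
--         if phrase not in res:
--             res.append(phrase)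
--         covered = start + toks
--     return res
-- ===== Notes on version B (the rewrite author's own statement) =====
-- stated objective: alternative
-- what changed: B replaces A's forward BIO-tag table plus rescanning loop (inner word-by-word extension and a 'covered' sentinel over word indices) by three different stages: a single backward pass computing each chunk's exclusive end, a comprehension that slices and joins one candidate phrase per begins-headed chunk, and a fold over the candidate list with a coverage frontier.
import Mathlib
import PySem

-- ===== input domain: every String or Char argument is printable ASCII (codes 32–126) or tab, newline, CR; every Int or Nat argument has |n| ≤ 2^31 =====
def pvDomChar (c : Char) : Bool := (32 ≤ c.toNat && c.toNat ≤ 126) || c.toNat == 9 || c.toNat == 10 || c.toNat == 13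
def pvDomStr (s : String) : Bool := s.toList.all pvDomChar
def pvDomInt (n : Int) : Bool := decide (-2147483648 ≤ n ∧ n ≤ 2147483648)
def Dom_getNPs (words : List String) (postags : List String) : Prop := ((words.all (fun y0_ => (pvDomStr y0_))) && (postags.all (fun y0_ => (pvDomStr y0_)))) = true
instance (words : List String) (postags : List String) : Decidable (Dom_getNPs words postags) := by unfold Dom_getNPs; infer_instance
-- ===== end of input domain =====

-- B restructures A's extraction: instead of A's forward BIO-tag table rescanned with an inner
-- extension loop and a 'covered' sentinel, B computes chunk ends in one backward pass, builds the
-- candidate phrases by slicing and joining, and folds the candidate list with a coverage frontier;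
-- the proved claim is about the return value on Pre_ (A raises IndexError outside it).

-- ===== PORT A =====
-- the tag A's first loop appends for index wx (body of the append, step for step)
def pvTagA (words : List String) (postags : List String) (wx : Nat) : String :=
  let pw := (PySem.List.pyGet? postags (wx : Int)).getD ""
  if pw = "NOUN" ∨ pw = "PROPN" ∨ pw = "ADJ" then
    if wx = 0 ∨
        (let pv := (PySem.List.pyGet? postags ((wx : Int) - 1)).getD ""
         pv ≠ "NOUN" ∧ pv ≠ "PROPN" ∧ pv ≠ "ADJ" ∧ pv ≠ "ADP" ∧ pv ≠ "CCONJ") then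
      "B-KP"
    else "I-KP"
  else if (pw = "CCONJ" ∨ pw = "ADP") ∧ (wx : Int) < (words.length : Int) - 1 ∧
          (let nx := (PySem.List.pyGet? postags ((wx : Int) + 1)).getD ""
           nx = "NOUN" ∨ nx = "PROPN") then
    "I-KP"
  else "O"

-- A's inner 'for wx2 in range(wx+1, len(words)): … else: break' loop
def pvScanA (kpTags : List String) (words : List String) (n : Nat) (j : Nat) (temp : String) : String :=
  if _h : j < n then
    if (PySem.List.pyGet? kpTags (j : Int)).getD "" ≠ "O" then
      pvScanA kpTags words n (j + 1) (temp ++ " " ++ (PySem.List.pyGet? words (j : Int)).getD "")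
    else temp
  else temp
termination_by n - j

-- A's second loop: for wx over the words with the 'covered'/'continue' bookkeeping
def pvLoopA (kpTags : List String) (words : List String) (n : Nat) (wx : Nat)
    (kpzones : List String) (covered : Int) : List String :=
  if h : wx < n then
    if covered ≠ -1 ∧ (wx : Int) < covered then
      pvLoopA kpTags words n (wx + 1) kpzones covered
    else if PySem.Str.startswith ((PySem.List.pyGet? kpTags (wx : Int)).getD "") "B" then
      let temp := pvScanA kpTags words n (wx + 1) ((PySem.List.pyGet? words (wx : Int)).getD "")
      let temp := PySem.Str.strip temp
      if (PySem.Str.split₀ temp).length = 1 then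
        pvLoopA kpTags words n (wx + 1) kpzones covered
      else
        let kpzones' := if temp ∉ kpzones then kpzones ++ [temp] else kpzones
        pvLoopA kpTags words n (wx + 1) kpzones' ((wx : Int) + ((PySem.Str.split₀ temp).length : Int))
    else
      pvLoopA kpTags words n (wx + 1) kpzones covered
  else kpzones
termination_by n - wx

def getNPs (words : List String) (postags : List String) : List String :=
  let kpTags := (List.range words.length).foldl (fun acc wx => acc ++ [pvTagA words postags wx]) []
  pvLoopA kpTags words words.length 0 [] (-1)

-- ===== PORT B =====
def pvNonO (words : List String) (postags : List String) (j : Nat) : Bool :=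
  let t := (PySem.List.pyGet? postags (j : Int)).getD ""
  (t = "NOUN" ∨ t = "PROPN" ∨ t = "ADJ") ∨
    ((t = "CCONJ" ∨ t = "ADP") ∧ j + 1 < words.length ∧
      (let nx := (PySem.List.pyGet? postags ((j : Int) + 1)).getD ""
       nx = "NOUN" ∨ nx = "PROPN"))

def pvBegins (words : List String) (postags : List String) (i : Nat) : Bool :=
  let t := (PySem.List.pyGet? postags (i : Int)).getD ""
  (t = "NOUN" ∨ t = "PROPN" ∨ t = "ADJ") ∧
    (i = 0 ∨
      (let pv := (PySem.List.pyGet? postags ((i : Int) - 1)).getD ""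
       pv ≠ "NOUN" ∧ pv ≠ "PROPN" ∧ pv ≠ "ADJ" ∧ pv ≠ "ADP" ∧ pv ≠ "CCONJ"))

-- B's backward pass 'for j in range(n-1,-1,-1): end[j] = end[j+1] if non_o(j) else j',
-- the filled array realized as a list built from the right (head of acc = end[j+1])
def pvEndList (words : List String) (postags : List String) (n : Nat) : List Nat :=
  (List.range n).foldr (fun j acc => (if pvNonO words postags j then acc.headD n else j) :: acc) [n]

-- B's frontier-fold step (the body of Source B's final 'for start, phrase in cands' loop)
def pvStepB (st : List String × Nat) (sp : Nat × String) : List String × Nat :=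
  if sp.1 < st.2 then st
  else
    let toks := (PySem.Str.split₀ sp.2).length
    if toks = 1 then st
    else ((if sp.2 ∉ st.1 then st.1 ++ [sp.2] else st.1), sp.1 + toks)

def getNPs_alt (words : List String) (postags : List String) : List String :=
  let n := words.length
  let endl := pvEndList words postags n
  -- B's candidate comprehension: [(i, " ".join(words[i:end[i]]).strip()) for i in range(n) if begins(i)]
  let cands := (List.range n).foldl (fun acc i =>
    if pvBegins words postags i then
      acc ++ [(i, PySem.Str.strip (PySem.Str.join " "
        (PySem.List.slice words (some (i : Int)) (some (((PySem.List.pyGet? endl (i : Int)).getD 0 : Nat) : Int)))))]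
    else acc) ([] : List (Nat × String))
  -- B's final fold over the candidate list with the coverage frontier
  (cands.foldl pvStepB (([] : List String), (0 : Nat))).1

-- ===== PRECONDITION & SPEC =====
-- Pre_ excludes exactly the inputs on which Python A raises IndexError: postags shorter than words.
def Pre_getNPs (words : List String) (postags : List String) : Prop :=
  words.length ≤ postags.length
instance (words : List String) (postags : List String) : Decidable (Pre_getNPs words postags) := by
  unfold Pre_getNPs; infer_instance

def pvWitness_getNPs : List String × List String :=
  (["big", "cat", "runs"], ["ADJ", "NOUN", "VERB"])

def Spec_getNPs (words : List String) (postags : List String) (out : List String) : Prop := out = getNPs_alt words postags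
instance (words : List String) (postags : List String) (out : List String) : Decidable (Spec_getNPs words postags out) := by unfold Spec_getNPs; infer_instance

-- ===== CLAIM (what is proved, stated in full; the proofs are below) =====
def Claim_equal_getNPs : Prop := ∀ (words : List String) (postags : List String), Dom_getNPs words postags → Pre_getNPs words postags → Spec_getNPs words postags (getNPs words postags)

-- ===== LEMMAS AND PROOFS =====

-- Proof-only middle form: the fused single pass with an index jump (neither port computes with it).
def pvMidScan (words : List String) (postags : List String) (n : Nat) (j : Nat) (phrase : String) : String :=
  if _h : j < n ∧ pvNonO words postags j then
    pvMidScan words postags n (j + 1) (phrase ++ " " ++ (PySem.List.pyGet? words (j : Int)).getD "")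
  else phrase
termination_by n - j

def pvMid (words : List String) (postags : List String) (n : Nat) (i : Nat)
    (res : List String) : List String :=
  if h : i < n then
    if pvBegins words postags i then
      let phrase := pvMidScan words postags n (i + 1) ((PySem.List.pyGet? words (i : Int)).getD "")
      let phrase := PySem.Str.strip phrase
      let toks := (PySem.Str.split₀ phrase).length
      let res' := if toks ≠ 1 ∧ phrase ∉ res then res ++ [phrase] else res
      pvMid words postags n (i + max toks 1) res'
    else
      pvMid words postags n (i + 1) res
  else res
termination_by n - i
decreasing_by all_goals omega

-- exclusive end of the maximal non-O chunk containing j (the value B's backward pass stores)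
def pvChunkEnd (words : List String) (postags : List String) (j : Nat) : Nat :=
  if _h : j < words.length then
    (if pvNonO words postags j then pvChunkEnd words postags (j + 1) else j)
  else words.length
termination_by words.length - j

-- candidates with start ≥ j, in the phrase form of B
def pvCFrom (words : List String) (postags : List String) (j : Nat) : List (Nat × String) :=
  ((List.range' j (words.length - j)).filter (fun i => pvBegins words postags i)).map
    (fun i => (i, PySem.Str.strip (PySem.Str.join " "
      (PySem.List.slice words (some (i : Int)) (some ((pvChunkEnd words postags i : Nat) : Int))))))

-- ---- part 1: port A equals pvMid ----
theorem pvKpTags_eq_map (words postags : List String) :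
    (List.range words.length).foldl (fun acc wx => acc ++ [pvTagA words postags wx]) []
      = (List.range words.length).map (pvTagA words postags) := by
  simpa using PySem.List.foldl_append_singleton_eq_map (pvTagA words postags) (List.range words.length) []

theorem pvTag_lookup (words postags : List String) (wx : Nat) (h : wx < words.length) :
    (PySem.List.pyGet? ((List.range words.length).map (pvTagA words postags)) (wx : Int)).getD ""
      = pvTagA words postags wx := by
  rw [PySem.List.pyGet?_natCast]
  simp [h]

theorem pvTag_begins (words postags : List String) (wx : Nat) :
    PySem.Str.startswith (pvTagA words postags wx) "B" = pvBegins words postags wx := by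
  have hB : PySem.Str.startswith "B-KP" "B" = true := by decide
  have hI : PySem.Str.startswith "I-KP" "B" = false := by decide
  have hO : PySem.Str.startswith "O" "B" = false := by decide
  unfold pvTagA pvBegins
  dsimp only
  split_ifs with h1 h2 h3
  · rw [hB]; simp_all
  · rw [hI]; simp_all
  · rw [hI]; simp_all
  · rw [hO]; simp_all

theorem pvTag_nonO (words postags : List String) (wx : Nat) :
    (decide (pvTagA words postags wx ≠ "O")) = pvNonO words postags wx := by
  unfold pvTagA pvNonO
  dsimp only
  split_ifs with h1 h2 h3
  · simp_all
  · simp_all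
  · obtain ⟨ha, hb, hc⟩ := h3
    have hb' : wx + 1 < words.length := by omega
    simp_all
  · have hL : (decide (("O" : String) ≠ "O")) = false := by decide
    rw [hL]
    symm
    rw [decide_eq_false_iff_not]
    rintro (hcon | ⟨ha, hb, hc⟩)
    · exact h1 hcon
    · exact h3 ⟨ha, by omega, hc⟩

theorem pvScan_eq_aux (words postags : List String) :
    ∀ (k j : Nat) (temp : String), words.length - j ≤ k →
      pvScanA ((List.range words.length).map (pvTagA words postags)) words words.length j temp
        = pvMidScan words postags words.length j temp := by
  intro k
  induction k with
  | zero =>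
    intro j temp hk
    rw [pvScanA, pvMidScan]
    have hj : ¬ j < words.length := by omega
    simp [hj]
  | succ k ih =>
    intro j temp hk
    rw [pvScanA, pvMidScan]
    by_cases hj : j < words.length
    · rw [dif_pos hj]
      rw [pvTag_lookup words postags j hj]
      have hiff : (pvTagA words postags j ≠ "O") ↔ pvNonO words postags j = true := by
        rw [← pvTag_nonO]; simp
      by_cases hO : pvTagA words postags j ≠ "O"
      · rw [if_pos hO, dif_pos ⟨hj, hiff.mp hO⟩]
        exact ih (j + 1) _ (by omega)
      · rw [if_neg hO, dif_neg]
        intro hcon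
        exact hO (hiff.mpr hcon.2)
    · rw [dif_neg hj, dif_neg (by intro hcon; exact hj hcon.1)]

theorem pvScan_eq (words postags : List String) (j : Nat) (temp : String) :
    pvScanA ((List.range words.length).map (pvTagA words postags)) words words.length j temp
      = pvMidScan words postags words.length j temp :=
  pvScan_eq_aux words postags (words.length - j) j temp le_rfl

-- A step of the outer loop with wx < covered is a pure skip: d such steps land at wx + d.
theorem pvLoopA_skip (kpTags words : List String) (n : Nat) :
    ∀ (d wx : Nat) (z : List String),
      pvLoopA kpTags words n wx z ((wx : Int) + (d : Int))
        = pvLoopA kpTags words n (wx + d) z (((wx + d : Nat) : Int)) := by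
  intro d
  induction d with
  | zero => intro wx z; norm_num
  | succ d ih =>
    intro wx z
    by_cases hw : wx < n
    · rw [pvLoopA, dif_pos hw, if_pos (by constructor <;> omega)]
      have : (wx : Int) + ((d : Nat) + 1 : Nat) = ((wx + 1 : Nat) : Int) + (d : Int) := by push_cast; ring
      rw [this, ih (wx + 1) z]
      norm_num [Nat.add_assoc, Nat.add_comm 1 d]
    · rw [pvLoopA, dif_neg hw, pvLoopA, dif_neg (by omega)]

theorem pvLoop_eq_aux (words postags : List String) :
    ∀ (k wx : Nat) (z : List String) (c : Int), words.length - wx ≤ k → c ≤ (wx : Int) →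
      pvLoopA ((List.range words.length).map (pvTagA words postags)) words words.length wx z c
        = pvMid words postags words.length wx z := by
  intro k
  induction k with
  | zero =>
    intro wx z c hk hc
    rw [pvLoopA, pvMid]
    have hw : ¬ wx < words.length := by omega
    simp [hw]
  | succ k ih =>
    intro wx z c hk hc
    rw [pvLoopA, pvMid]
    dsimp only
    by_cases hw : wx < words.length
    · rw [dif_pos hw, dif_pos hw, if_neg (by intro hcon; omega)]
      rw [pvTag_lookup words postags wx hw, pvTag_begins]
      by_cases hb : pvBegins words postags wx = true
      · rw [if_pos hb, if_pos hb]
        rw [pvScan_eq]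
        set phrase := PySem.Str.strip (pvMidScan words postags words.length (wx + 1)
          ((PySem.List.pyGet? words (wx : Int)).getD "")) with hphrase
        set toks := (PySem.Str.split₀ phrase).length with htoks
        by_cases h1 : toks = 1
        · rw [if_pos h1]
          have hz : (if toks ≠ 1 ∧ phrase ∉ z then z ++ [phrase] else z) = z := by
            rw [if_neg]; intro hcon; exact hcon.1 h1
          rw [hz, h1]
          exact ih (wx + 1) z c (by omega) (by omega)
        · rw [if_neg h1]
          have hz : (if phrase ∉ z then z ++ [phrase] else z)
              = (if toks ≠ 1 ∧ phrase ∉ z then z ++ [phrase] else z) := by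
            by_cases hm : phrase ∉ z
            · rw [if_pos hm, if_pos ⟨h1, hm⟩]
            · rw [if_neg hm, if_neg (by intro hcon; exact hm hcon.2)]
          rw [hz]
          set z' := if toks ≠ 1 ∧ phrase ∉ z then z ++ [phrase] else z with hz'
          by_cases h0 : toks = 0
          · rw [h0]
            norm_num
            exact ih (wx + 1) z' wx (by omega) (by omega)
          · -- toks ≥ 2: skip to wx + toks
            have h2 : 2 ≤ toks := by omega
            have hcast : (wx : Int) + (toks : Int) = ((wx + 1 : Nat) : Int) + ((toks - 1 : Nat) : Int) := by
              push_cast [Nat.cast_sub (by omega : 1 ≤ toks)]; ring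
            rw [hcast, pvLoopA_skip]
            have hidx : wx + 1 + (toks - 1) = wx + toks := by omega
            rw [hidx]
            have hmax : max toks 1 = toks := by omega
            rw [hmax]
            exact ih (wx + toks) z' (wx + toks) (by omega) (by omega)
      · rw [if_neg hb, if_neg hb]
        exact ih (wx + 1) z c (by omega) (by omega)
    · rw [dif_neg hw, dif_neg hw]

-- ---- part 2: pvMid equals port B ----

theorem pvChunkEnd_bounds_aux (words postags : List String) :
    ∀ (k j : Nat), words.length - j ≤ k →
      j ≤ max j (pvChunkEnd words postags j) ∧ pvChunkEnd words postags j ≤ words.length ∧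
      (j ≤ words.length → j ≤ pvChunkEnd words postags j) := by
  intro k
  induction k with
  | zero =>
    intro j hk
    rw [pvChunkEnd]
    have hj : ¬ j < words.length := by omega
    rw [dif_neg hj]
    exact ⟨le_max_left _ _, le_rfl, fun h => h⟩
  | succ k ih =>
    intro j hk
    rw [pvChunkEnd]
    by_cases hj : j < words.length
    · rw [dif_pos hj]
      by_cases hn : pvNonO words postags j = true
      · rw [if_pos hn]
        have := ih (j + 1) (by omega)
        refine ⟨le_max_left _ _, this.2.1, fun _ => ?_⟩
        have := this.2.2 (by omega)
        omega
      · rw [if_neg hn]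
        exact ⟨le_max_left _ _, by omega, fun _ => le_rfl⟩
    · rw [dif_neg hj]
      exact ⟨le_max_left _ _, le_rfl, fun h => h⟩

theorem pvChunkEnd_ge (words postags : List String) (j : Nat) (hj : j ≤ words.length) :
    j ≤ pvChunkEnd words postags j :=
  (pvChunkEnd_bounds_aux words postags (words.length - j) j le_rfl).2.2 hj


theorem pvChunkEnd_len (words postags : List String) :
    pvChunkEnd words postags words.length = words.length := by
  rw [pvChunkEnd]
  simp

theorem pvEnd_aux (words postags : List String) :
    ∀ d, d ≤ words.length →
      (List.range' (words.length - d) d).foldr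
          (fun j acc => (if pvNonO words postags j then acc.headD words.length else j) :: acc)
          [words.length]
        = (List.range' (words.length - d) (d + 1)).map (pvChunkEnd words postags) := by
  intro d
  induction d with
  | zero =>
    intro _
    simp [pvChunkEnd_len]
  | succ d ih =>
    intro hd
    have hm : words.length - (d + 1) < words.length := by omega
    have hm1 : words.length - (d + 1) + 1 = words.length - d := by omega
    rw [List.range'_succ, List.range'_succ, List.foldr_cons, List.map_cons,
      hm1, ih (by omega)]
    have hhead : ((List.range' (words.length - d) (d + 1)).map (pvChunkEnd words postags)).headD words.length
        = pvChunkEnd words postags (words.length - d) := by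
      rw [List.range'_succ, List.map_cons]
      rfl
    rw [hhead]
    have hce : (if pvNonO words postags (words.length - (d + 1)) then
          pvChunkEnd words postags (words.length - d)
        else words.length - (d + 1)) = pvChunkEnd words postags (words.length - (d + 1)) := by
      conv_rhs => rw [pvChunkEnd, dif_pos hm]
      rw [hm1]
    rw [hce]

theorem pvEndList_eq_map (words postags : List String) :
    pvEndList words postags words.length
      = (List.range (words.length + 1)).map (pvChunkEnd words postags) := by
  unfold pvEndList
  rw [List.range_eq_range', List.range_eq_range']
  have h := pvEnd_aux words postags words.length le_rfl
  simpa using h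

theorem pvEndList_lookup (words postags : List String) (i : Nat) (h : i < words.length) :
    ((PySem.List.pyGet? (pvEndList words postags words.length) (i : Int)).getD 0 : Nat)
      = pvChunkEnd words postags i := by
  rw [pvEndList_eq_map, PySem.List.pyGet?_natCast]
  have hi : i < ((List.range (words.length + 1)).map (pvChunkEnd words postags)).length := by
    simp; omega
  rw [List.getElem?_eq_getElem hi]
  simp

theorem pvMidScan_prefix_aux (words postags : List String) (n : Nat) :
    ∀ (k j : Nat) (a b : String), n - j ≤ k →
      pvMidScan words postags n j (a ++ b) = a ++ pvMidScan words postags n j b := by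
  intro k
  induction k with
  | zero =>
    intro j a b hk
    have hj : ¬ (j < n ∧ pvNonO words postags j = true) := fun hc => absurd hc.1 (by omega)
    conv_lhs => rw [pvMidScan, dif_neg hj]
    conv_rhs => rw [pvMidScan, dif_neg hj]
  | succ k ih =>
    intro j a b hk
    by_cases hc : j < n ∧ pvNonO words postags j = true
    · conv_lhs => rw [pvMidScan, dif_pos hc]
      conv_rhs => rw [pvMidScan, dif_pos hc]
      have harg : ((a ++ b) ++ " ") ++ (PySem.List.pyGet? words (j : Int)).getD ""
          = a ++ (((b ++ " ") ++ (PySem.List.pyGet? words (j : Int)).getD "")) := by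
        simp [String.append_assoc]
      rw [harg]
      exact ih (j + 1) a _ (by omega)
    · conv_lhs => rw [pvMidScan, dif_neg hc]
      conv_rhs => rw [pvMidScan, dif_neg hc]

theorem pvMidScan_prefix (words postags : List String) (n : Nat) (j : Nat) (a b : String) :
    pvMidScan words postags n j (a ++ b) = a ++ pvMidScan words postags n j b :=
  pvMidScan_prefix_aux words postags n (n - j) j a b le_rfl

theorem pvStrJoin_singleton (s x : String) : PySem.Str.join s [x] = x := by
  simp [PySem.Str.join]

theorem pvStrJoin_cons_cons (s x y : String) (r : List String) :
    PySem.Str.join s (x :: y :: r) = x ++ s ++ PySem.Str.join s (y :: r) := by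
  have h : (PySem.Str.join s (x :: y :: r)).toList = (x ++ s ++ PySem.Str.join s (y :: r)).toList := by
    simp [PySem.Str.toList_join, PySem.Chars.join_cons_cons]
  exact String.toList_inj.mp h

theorem pvScan_join (words postags : List String) :
    ∀ (k j : Nat) (init : String), words.length - j ≤ k → j ≤ words.length →
      PySem.Str.join " " (init :: PySem.List.slice words (some (j : Int))
          (some ((pvChunkEnd words postags j : Nat) : Int)))
        = pvMidScan words postags words.length j init := by
  intro k
  induction k with
  | zero =>
    intro j init hk hj
    have hj' : j = words.length := by omega
    have hce : pvChunkEnd words postags j = j := by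
      subst hj'; exact pvChunkEnd_len words postags
    rw [hce, PySem.List.slice_natCast]
    simp [pvStrJoin_singleton]
    rw [pvMidScan, dif_neg (by omega)]
  | succ k ih =>
    intro j init hk hj
    by_cases hc : j < words.length ∧ pvNonO words postags j = true
    · have hce : pvChunkEnd words postags j = pvChunkEnd words postags (j + 1) := by
        rw [pvChunkEnd, dif_pos hc.1, if_pos hc.2]
      have he1 : j + 1 ≤ pvChunkEnd words postags (j + 1) :=
        pvChunkEnd_ge words postags (j + 1) (by omega)
      have hslice : PySem.List.slice words (some (j : Int))
            (some ((pvChunkEnd words postags (j + 1) : Nat) : Int))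
          = words[j]'hc.1 :: PySem.List.slice words (some ((j + 1 : Nat) : Int))
              (some ((pvChunkEnd words postags (j + 1) : Nat) : Int)) := by
        rw [PySem.List.slice_natCast, PySem.List.slice_natCast,
          List.drop_eq_getElem_cons hc.1]
        have ht : pvChunkEnd words postags (j + 1) - j = (pvChunkEnd words postags (j + 1) - (j + 1)) + 1 := by
          omega
        rw [ht, List.take_succ_cons]
      rw [hce, hslice, pvStrJoin_cons_cons,
        ih (j + 1) (words[j]'hc.1) (by omega) (by omega)]
      conv_rhs => rw [pvMidScan, dif_pos hc]
      have hw : (PySem.List.pyGet? words (j : Int)).getD "" = words[j]'hc.1 := by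
        rw [PySem.List.pyGet?_natCast, List.getElem?_eq_getElem hc.1]
        rfl
      rw [hw, pvMidScan_prefix words postags words.length (j + 1) (init ++ " ") (words[j]'hc.1)]
    · have hce : pvChunkEnd words postags j = j := by
        by_cases hjl : j < words.length
        · rw [pvChunkEnd, dif_pos hjl, if_neg (by rw [Bool.not_eq_true]; by_contra hb; exact hc ⟨hjl, by simpa using hb⟩)]
        · have : j = words.length := by omega
          subst this; exact pvChunkEnd_len words postags
      rw [hce, PySem.List.slice_natCast]
      simp [pvStrJoin_singleton]
      rw [pvMidScan, dif_neg hc]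

theorem pvCands_eq (words postags : List String) :
    (List.range words.length).foldl (fun acc i =>
      if pvBegins words postags i then
        acc ++ [(i, PySem.Str.strip (PySem.Str.join " "
          (PySem.List.slice words (some (i : Int))
            (some (((PySem.List.pyGet? (pvEndList words postags words.length) (i : Int)).getD 0 : Nat) : Int)))))]
      else acc) ([] : List (Nat × String))
      = pvCFrom words postags 0 := by
  rw [PySem.List.foldl_append_if (fun i => pvBegins words postags i)
    (fun i => (i, PySem.Str.strip (PySem.Str.join " "
      (PySem.List.slice words (some (i : Int))
        (some (((PySem.List.pyGet? (pvEndList words postags words.length) (i : Int)).getD 0 : Nat) : Int))))))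
    (List.range words.length) []]
  unfold pvCFrom
  rw [List.nil_append, List.range_eq_range', Nat.sub_zero]
  apply List.map_congr_left
  intro i hi
  have hilt : i < words.length := by
    have := List.of_mem_filter hi
    have hmem := List.mem_filter.mp hi
    have := List.mem_range'.mp hmem.1
    omega
  rw [pvEndList_lookup words postags i hilt]

theorem pvCFrom_succ (words postags : List String) (j : Nat) (hj : j < words.length) :
    pvCFrom words postags j
      = (if pvBegins words postags j then
          [(j, PySem.Str.strip (PySem.Str.join " "
            (PySem.List.slice words (some (j : Int)) (some ((pvChunkEnd words postags j : Nat) : Int)))))]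
        else []) ++ pvCFrom words postags (j + 1) := by
  unfold pvCFrom
  have hr : List.range' j (words.length - j) = j :: List.range' (j + 1) (words.length - (j + 1)) := by
    have h1 : words.length - j = (words.length - (j + 1)) + 1 := by omega
    rw [h1, List.range'_succ]
  rw [hr, List.filter_cons]
  by_cases hb : pvBegins words postags j = true
  · simp [hb]
  · simp [hb]

theorem pvCFrom_nil (words postags : List String) (j : Nat) (hj : words.length ≤ j) :
    pvCFrom words postags j = [] := by
  unfold pvCFrom
  have h0 : words.length - j = 0 := by omega
  rw [h0]
  simp

theorem pvBegins_nonO (words postags : List String) (i : Nat)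
    (h : pvBegins words postags i = true) : pvNonO words postags i = true := by
  unfold pvBegins at h
  unfold pvNonO
  simp only [decide_eq_true_eq] at h ⊢
  exact Or.inl h.1

theorem pvPhraseB_eq (words postags : List String) (j : Nat) (hj : j < words.length)
    (hn : pvNonO words postags j = true) :
    PySem.Str.join " " (PySem.List.slice words (some (j : Int))
        (some ((pvChunkEnd words postags j : Nat) : Int)))
      = pvMidScan words postags words.length (j + 1) ((PySem.List.pyGet? words (j : Int)).getD "") := by
  have hce : pvChunkEnd words postags j = pvChunkEnd words postags (j + 1) := by
    rw [pvChunkEnd, dif_pos hj, if_pos hn]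
  have he1 : j + 1 ≤ pvChunkEnd words postags (j + 1) :=
    pvChunkEnd_ge words postags (j + 1) (by omega)
  have hslice : PySem.List.slice words (some (j : Int))
        (some ((pvChunkEnd words postags (j + 1) : Nat) : Int))
      = words[j]'hj :: PySem.List.slice words (some ((j + 1 : Nat) : Int))
          (some ((pvChunkEnd words postags (j + 1) : Nat) : Int)) := by
    rw [PySem.List.slice_natCast, PySem.List.slice_natCast, List.drop_eq_getElem_cons hj]
    have ht : pvChunkEnd words postags (j + 1) - j = (pvChunkEnd words postags (j + 1) - (j + 1)) + 1 := by
      omega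
    rw [ht, List.take_succ_cons]
  have hw : (PySem.List.pyGet? words (j : Int)).getD "" = words[j]'hj := by
    rw [PySem.List.pyGet?_natCast, List.getElem?_eq_getElem hj]
    rfl
  rw [hce, hslice, hw,
    pvScan_join words postags (words.length - (j + 1)) (j + 1) (words[j]'hj) le_rfl (by omega)]

theorem pvFold_skipMany (words postags : List String) :
    ∀ (d j : Nat) (res : List String) (c : Nat), j + d ≤ c →
      (pvCFrom words postags j).foldl pvStepB (res, c)
        = (pvCFrom words postags (j + d)).foldl pvStepB (res, c) := by
  intro d
  induction d with
  | zero => intro j res c _; rfl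
  | succ d ih =>
    intro j res c hd
    have hstep : (pvCFrom words postags j).foldl pvStepB (res, c)
        = (pvCFrom words postags (j + 1)).foldl pvStepB (res, c) := by
      by_cases hjl : j < words.length
      · rw [pvCFrom_succ words postags j hjl]
        by_cases hb : pvBegins words postags j = true
        · rw [if_pos hb, List.singleton_append, List.foldl_cons]
          have : pvStepB (res, c) (j, PySem.Str.strip (PySem.Str.join " "
              (PySem.List.slice words (some (j : Int))
                (some ((pvChunkEnd words postags j : Nat) : Int))))) = (res, c) := by
            unfold pvStepB
            rw [if_pos (by simpa using (by omega : j < c))]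
          rw [this]
        · rw [if_neg hb, List.nil_append]
      · rw [pvCFrom_nil words postags j (by omega), pvCFrom_nil words postags (j + 1) (by omega)]
    rw [hstep]
    have : j + 1 + d = j + (d + 1) := by omega
    rw [← this] at hd ⊢
    exact ih (j + 1) res c hd

set_option maxHeartbeats 1000000 in
theorem pvFold_eq_mid (words postags : List String) :
    ∀ (k j : Nat) (res : List String) (c : Nat), words.length - j ≤ k → c ≤ j →
      ((pvCFrom words postags j).foldl pvStepB (res, c)).1
        = pvMid words postags words.length j res := by
  intro k
  induction k with
  | zero =>
    intro j res c hk hc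
    rw [pvCFrom_nil words postags j (by omega), pvMid, dif_neg (by omega)]
    rfl
  | succ k ih =>
    intro j res c hk hc
    by_cases hjl : j < words.length
    · rw [pvCFrom_succ words postags j hjl, pvMid, dif_pos hjl]
      dsimp only
      by_cases hb : pvBegins words postags j = true
      · rw [if_pos hb, if_pos hb, List.singleton_append, List.foldl_cons]
        have hn := pvBegins_nonO words postags j hb
        set phrase := PySem.Str.strip (pvMidScan words postags words.length (j + 1)
          ((PySem.List.pyGet? words (j : Int)).getD "")) with hph
        have hpe : PySem.Str.strip (PySem.Str.join " "
            (PySem.List.slice words (some (j : Int))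
              (some ((pvChunkEnd words postags j : Nat) : Int)))) = phrase := by
          rw [pvPhraseB_eq words postags j hjl hn]
        rw [hpe]
        set toks := (PySem.Str.split₀ phrase).length with htoks
        have hstep : pvStepB (res, c) (j, phrase)
            = (if toks = 1 then (res, c)
              else ((if phrase ∉ res then res ++ [phrase] else res), j + toks)) := by
          unfold pvStepB
          rw [if_neg (by simp; omega)]
        rw [hstep]
        by_cases h1 : toks = 1
        · rw [if_pos h1]
          have hz : (if toks ≠ 1 ∧ phrase ∉ res then res ++ [phrase] else res) = res := by
            rw [if_neg]; intro hcon; exact hcon.1 h1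
          rw [hz, h1]
          exact ih (j + 1) res c (by omega) (by omega)
        · rw [if_neg h1]
          have hz : (if phrase ∉ res then res ++ [phrase] else res)
              = (if toks ≠ 1 ∧ phrase ∉ res then res ++ [phrase] else res) := by
            by_cases hm : phrase ∉ res
            · rw [if_pos hm, if_pos ⟨h1, hm⟩]
            · rw [if_neg hm, if_neg (by intro hcon; exact hm hcon.2)]
          rw [hz]
          set res' := if toks ≠ 1 ∧ phrase ∉ res then res ++ [phrase] else res with hres'
          by_cases h0 : toks = 0
          · rw [h0]
            have hmax : max 0 1 = 1 := by omega
            rw [hmax]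
            have := ih (j + 1) res' j (by omega) (by omega)
            simpa using this
          · have h2 : 2 ≤ toks := by omega
            have hmax : max toks 1 = toks := by omega
            rw [hmax]
            by_cases hin : j + toks ≤ words.length
            · have hsm := pvFold_skipMany words postags (toks - 1) (j + 1) res' (j + toks) (by omega)
              have hidx : j + 1 + (toks - 1) = j + toks := by omega
              rw [hidx] at hsm
              rw [hsm]
              exact ih (j + toks) res' (j + toks) (by omega) (by omega)
            · have hsm := pvFold_skipMany words postags (words.length - (j + 1)) (j + 1) res' (j + toks) (by omega)
              have hidx : j + 1 + (words.length - (j + 1)) = words.length := by omega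
              rw [hidx] at hsm
              rw [hsm, pvCFrom_nil words postags words.length le_rfl, pvMid, dif_neg (by omega)]
              rfl
      · rw [if_neg hb, if_neg hb, List.nil_append]
        exact ih (j + 1) res c (by omega) (by omega)
    · rw [pvCFrom_nil words postags j (by omega), pvMid, dif_neg (by omega)]
      rfl

-- ===== VERDICT (by name: the statement is the Claim_ definition above) =====
theorem getNPs_spec : Claim_equal_getNPs := by
  intro words postags _ _
  unfold Spec_getNPs getNPs getNPs_alt
  rw [pvKpTags_eq_map]
  rw [pvLoop_eq_aux words postags words.length 0 [] (-1) (by omega) (by omega)]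
  dsimp only
  rw [pvCands_eq]
  exact (pvFold_eq_mid words postags words.length 0 [] 0 (by omega) (by omega)).symm
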